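-- pv_equiv track=rewrite | github.com/linewalks/catalog-mimic | catalog/cardio/pattern.py | _map_drug_group
-- ===== SOURCE A (Python) =====
-- def _map_drug_group(drug_list):
--   d_drug_group = dict()
--   grp_statin = [
--       "atorvastatin", "pitavastatin", "lovastatin", "simvastatin",
--       "pravastatin", "fluvastatin", "rosuvastatin"
--   ]
--   grp_p2y12_inh = [
--       "clopidogrel", "ticlopidine", "ticagrelor", "prasugrel", "cangrelor"
--   ]
--   grp_nsaids = [
--       "acetaminophen", "celecoxib", "diclofenac", "diflunisal",
--       "etodolac", "ibuprofen", "indomethacin", "ketoprofen", "ketorolac",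
--       "nabumetone", "naproxen", "oxaprozin", "piroxicam", "salsalate",
--       "sulindac", "tolmetin"
--   ]
--   grp_immunosuppr = [
--       "tacrolimus", "cyclosporine", "mycophenolate mofetil",
--       "mycophenolate sodium", "azathioprine", "sirolimus", "prednisone"
--   ]
--   grp_aspirin = ["aspirin"]
--
--   for drug in drug_list:
--     ldrug = drug.lower()
--     if ldrug in (grp_statin):
--       d_drug_group[drug] = "Statin"
--     elif ldrug in (grp_immunosuppr):
--       d_drug_group[drug] = "Immunosuppressant"
--     elif ldrug in (grp_aspirin):
--       d_drug_group[drug] = "Aspirin"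
--     elif ldrug in (grp_nsaids):
--       d_drug_group[drug] = "NSAIDs"
--     elif ldrug in (grp_p2y12_inh):
--       d_drug_group[drug] = "P2Y12 inhibitor"
--     else:
--       d_drug_group[drug] = "Others"
--   return d_drug_group
-- ===== SOURCE B (Python) =====
-- _GROUPS = [
--     ("P2Y12 inhibitor", {
--         "clopidogrel", "ticlopidine", "ticagrelor", "prasugrel", "cangrelor"
--     }),
--     ("NSAIDs", {
--         "acetaminophen", "celecoxib", "diclofenac", "diflunisal",
--         "etodolac", "ibuprofen", "indomethacin", "ketoprofen", "ketorolac",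
--         "nabumetone", "naproxen", "oxaprozin", "piroxicam", "salsalate",
--         "sulindac", "tolmetin"
--     }),
--     ("Aspirin", {"aspirin"}),
--     ("Immunosuppressant", {
--         "tacrolimus", "cyclosporine", "mycophenolate mofetil",
--         "mycophenolate sodium", "azathioprine", "sirolimus", "prednisone"
--     }),
--     ("Statin", {
--         "atorvastatin", "pitavastatin", "lovastatin", "simvastatin",
--         "pravastatin", "fluvastatin", "rosuvastatin"
--     }),
-- ]
--
--
-- def _map_drug_group(drug_list):
--   # Staged passes: first label everything "Others", then one sweep per drug
--   # group relabels the drugs belonging to that group.  Correct because the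
--   # five group name sets are pairwise disjoint, so sweep order never matters.
--   result = {drug: "Others" for drug in drug_list}
--   for label, names in _GROUPS:
--     for drug in result:
--       if drug.lower() in names:
--         result[drug] = label
--   return result
-- ===== Notes on version B (the rewrite author's own statement) =====
-- stated objective: alternative
-- what changed: Inverted the loop structure: instead of classifying each drug through a five-way elif cascade of membership tests, B initializes every drug to "Others" in one pass and then makes one relabeling sweep per drug group over the result, overwriting matches; correct because the five group name sets are pairwise disjoint so sweep order is irrelevant.
import Mathlib
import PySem

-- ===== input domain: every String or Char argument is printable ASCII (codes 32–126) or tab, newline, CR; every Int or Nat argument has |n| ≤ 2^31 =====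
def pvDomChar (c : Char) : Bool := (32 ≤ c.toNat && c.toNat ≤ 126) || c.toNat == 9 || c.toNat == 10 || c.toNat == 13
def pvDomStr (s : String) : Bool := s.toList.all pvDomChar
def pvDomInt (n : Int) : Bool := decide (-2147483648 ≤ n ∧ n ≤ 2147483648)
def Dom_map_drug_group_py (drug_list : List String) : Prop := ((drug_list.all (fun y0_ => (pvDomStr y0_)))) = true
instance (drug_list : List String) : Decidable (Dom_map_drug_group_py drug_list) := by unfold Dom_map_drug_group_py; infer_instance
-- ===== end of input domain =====

-- B inverts A's loop structure: everything starts as "Others", then one relabeling sweep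
-- per drug group overwrites its members (objective: alternative; five-way elif cascade eliminated).

-- ===== PORT A =====
def pvGrpStatin : List String :=
  ["atorvastatin", "pitavastatin", "lovastatin", "simvastatin",
   "pravastatin", "fluvastatin", "rosuvastatin"]
def pvGrpP2y12 : List String :=
  ["clopidogrel", "ticlopidine", "ticagrelor", "prasugrel", "cangrelor"]
def pvGrpNsaids : List String :=
  ["acetaminophen", "celecoxib", "diclofenac", "diflunisal",
   "etodolac", "ibuprofen", "indomethacin", "ketoprofen", "ketorolac",
   "nabumetone", "naproxen", "oxaprozin", "piroxicam", "salsalate",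
   "sulindac", "tolmetin"]
def pvGrpImmuno : List String :=
  ["tacrolimus", "cyclosporine", "mycophenolate mofetil",
   "mycophenolate sodium", "azathioprine", "sirolimus", "prednisone"]
def pvGrpAspirin : List String := ["aspirin"]

-- A's per-drug elif cascade on the lowered name
def pvCascade (ldrug : String) : String :=
  if ldrug ∈ pvGrpStatin then "Statin"
  else if ldrug ∈ pvGrpImmuno then "Immunosuppressant"
  else if ldrug ∈ pvGrpAspirin then "Aspirin"
  else if ldrug ∈ pvGrpNsaids then "NSAIDs"
  else if ldrug ∈ pvGrpP2y12 then "P2Y12 inhibitor"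
  else "Others"

def map_drug_group_py (drug_list : List String) : List (String × String) :=
  (drug_list.foldl
    (fun d drug => d.insert drug (pvCascade (PySem.Str.lower drug)))
    (PySem.Dict.empty : PySem.Dict String String)).items

-- ===== PORT B =====
-- Source B's module-level _GROUPS table: (label, name set) pairs, in sweep order
def pvGroups : List (String × List String) :=
  [("P2Y12 inhibitor",
    ["clopidogrel", "ticlopidine", "ticagrelor", "prasugrel", "cangrelor"]),
   ("NSAIDs",
    ["acetaminophen", "celecoxib", "diclofenac", "diflunisal",
     "etodolac", "ibuprofen", "indomethacin", "ketoprofen", "ketorolac",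
     "nabumetone", "naproxen", "oxaprozin", "piroxicam", "salsalate",
     "sulindac", "tolmetin"]),
   ("Aspirin", ["aspirin"]),
   ("Immunosuppressant",
    ["tacrolimus", "cyclosporine", "mycophenolate mofetil",
     "mycophenolate sodium", "azathioprine", "sirolimus", "prednisone"]),
   ("Statin",
    ["atorvastatin", "pitavastatin", "lovastatin", "simvastatin",
     "pravastatin", "fluvastatin", "rosuvastatin"])]

def map_drug_group_py_alt (drug_list : List String) : List (String × String) :=
  -- result = {drug: "Others" for drug in drug_list}
  let d0 : PySem.Dict String String :=
    drug_list.foldl (fun d drug => d.insert drug "Others") PySem.Dict.empty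
  -- for label, names in _GROUPS: for drug in result: if drug.lower() in names: result[drug] = label
  (pvGroups.foldl
    (fun d p =>
      d.keys.foldl
        (fun d' drug => if PySem.Str.lower drug ∈ p.2 then d'.insert drug p.1 else d') d)
    d0).items

-- ===== PRECONDITION & SPEC =====
def Spec_map_drug_group_py (drug_list : List String) (out : List (String × String)) : Prop := out = map_drug_group_py_alt drug_list
instance (drug_list : List String) (out : List (String × String)) : Decidable (Spec_map_drug_group_py drug_list out) := by unfold Spec_map_drug_group_py; infer_instance

-- ===== CLAIM (what is proved, stated in full; the proofs are below) =====
def Claim_equal_map_drug_group_py : Prop := ∀ (drug_list : List String), Dom_map_drug_group_py drug_list → Spec_map_drug_group_py drug_list (map_drug_group_py drug_list)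

-- ===== LEMMAS AND PROOFS =====

-- getD after a fold inserting key-determined values
theorem pv_getD_foldl_insert_fun (l : List String) (g : String → String)
    (d : PySem.Dict String String) (k dflt : String) :
    (l.foldl (fun d x => d.insert x (g x)) d).getD k dflt
      = if k ∈ l then g k else d.getD k dflt := by
  induction l generalizing d with
  | nil => simp
  | cons x xs ih =>
    simp only [List.foldl_cons, ih, PySem.Dict.getD_insert, List.mem_cons]
    by_cases h1 : k ∈ xs <;> by_cases h2 : k = x <;> simp [h1, h2]

-- getD after one conditional relabeling sweep
theorem pv_getD_sweep (l names : List String) (v : String)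
    (d : PySem.Dict String String) (k dflt : String) :
    (l.foldl (fun d' x => if PySem.Str.lower x ∈ names then d'.insert x v else d') d).getD k dflt
      = if k ∈ l ∧ PySem.Str.lower k ∈ names then v else d.getD k dflt := by
  induction l generalizing d with
  | nil => simp
  | cons x xs ih =>
    simp only [List.foldl_cons]
    by_cases hx : PySem.Str.lower x ∈ names <;>
      simp only [hx, if_true, if_false, ih, PySem.Dict.getD_insert, List.mem_cons] <;>
      by_cases h2 : k = x <;> simp_all

-- a sweep over keys already present does not change the key sequence
theorem pv_keys_sweep (l names : List String) (v : String)
    (d : PySem.Dict String String) (h : ∀ x ∈ l, x ∈ d.keys) :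
    (l.foldl (fun d' x => if PySem.Str.lower x ∈ names then d'.insert x v else d') d).keys
      = d.keys := by
  induction l generalizing d with
  | nil => simp
  | cons x xs ih =>
    simp only [List.foldl_cons]
    by_cases hx : PySem.Str.lower x ∈ names
    · have hc : d.contains x = true :=
        (PySem.Dict.contains_iff_mem_keys _ _).2 (h x (List.mem_cons_self))
      have hk : (d.insert x v).keys = d.keys := PySem.Dict.keys_insert_of_contains d v hc
      simp only [hx, if_true]
      rw [ih _ (fun y hy => by rw [hk]; exact h y (List.mem_cons_of_mem _ hy)), hk]
    · simp only [hx, if_false]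
      exact ih _ (fun y hy => h y (List.mem_cons_of_mem _ hy))

-- keys and lookups through the whole sequence of group sweeps
theorem pv_keys_groupfold (gs : List (String × List String))
    (d : PySem.Dict String String) :
    (gs.foldl
      (fun d p => d.keys.foldl
        (fun d' x => if PySem.Str.lower x ∈ p.2 then d'.insert x p.1 else d') d) d).keys
      = d.keys := by
  induction gs generalizing d with
  | nil => rfl
  | cons p ps ih =>
    simp only [List.foldl_cons]
    rw [ih, pv_keys_sweep _ _ _ _ (fun x hx => hx)]

theorem pv_getD_groupfold (gs : List (String × List String))
    (d : PySem.Dict String String) (k dflt : String) :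
    (gs.foldl
      (fun d p => d.keys.foldl
        (fun d' x => if PySem.Str.lower x ∈ p.2 then d'.insert x p.1 else d') d) d).getD k dflt
      = if k ∈ d.keys then
          gs.foldl (fun acc p => if PySem.Str.lower k ∈ p.2 then p.1 else acc) (d.getD k dflt)
        else d.getD k dflt := by
  induction gs generalizing d with
  | nil => simp
  | cons p ps ih =>
    simp only [List.foldl_cons, ih, pv_keys_sweep _ _ _ _ (fun x hx => hx),
      pv_getD_sweep]
    by_cases hk : k ∈ d.keys <;> by_cases hm : PySem.Str.lower k ∈ p.2 <;> simp [hk, hm]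

-- the sweep chain classifies every lowered name exactly as A's elif cascade
theorem pv_chain_eq_cascade (s : String) :
    pvGroups.foldl (fun acc p => if s ∈ p.2 then p.1 else acc) "Others" = pvCascade s := by
  simp only [pvGroups, pvCascade, pvGrpStatin, pvGrpImmuno, pvGrpAspirin, pvGrpNsaids,
    pvGrpP2y12, List.foldl_cons, List.foldl_nil, List.mem_cons, List.not_mem_nil, or_false]

theorem map_drug_group_py_spec : Claim_equal_map_drug_group_py := by
  intro drug_list _
  unfold Spec_map_drug_group_py map_drug_group_py map_drug_group_py_alt
  -- both sides as key-sequence maps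
  have hkeysA :
      ((drug_list.foldl
        (fun d drug => d.insert drug (pvCascade (PySem.Str.lower drug)))
        (PySem.Dict.empty : PySem.Dict String String))).keys
        = PySem.Set.update ([] : List String) drug_list := by
    rw [PySem.Dict.keys_foldl_insert]; rfl
  have hnodU : List.Nodup (PySem.Set.update ([] : List String) drug_list) :=
    PySem.Set.nodup_update _ _ (by simp)
  set d0 : PySem.Dict String String :=
    drug_list.foldl (fun d drug => d.insert drug "Others") PySem.Dict.empty with hd0
  have hkeys0 : d0.keys = PySem.Set.update ([] : List String) drug_list := by
    rw [hd0, PySem.Dict.keys_foldl_insert]; rfl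
  have hkeysB :
      ((pvGroups.foldl
        (fun d p => d.keys.foldl
          (fun d' drug => if PySem.Str.lower drug ∈ p.2 then d'.insert drug p.1 else d') d)
        d0)).keys = PySem.Set.update ([] : List String) drug_list := by
    rw [pv_keys_groupfold, hkeys0]
  rw [PySem.Dict.items_eq_map_keys _ (by rw [hkeysA]; exact hnodU) "Others",
      PySem.Dict.items_eq_map_keys _ (by rw [hkeysB]; exact hnodU) "Others",
      hkeysA, hkeysB]
  apply List.map_congr_left
  intro k hk
  have hkin : k ∈ drug_list := by simpa using hk
  have hA := pv_getD_foldl_insert_fun drug_list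
      (fun drug => pvCascade (PySem.Str.lower drug))
      (PySem.Dict.empty : PySem.Dict String String) k "Others"
  have h0 := pv_getD_foldl_insert_fun drug_list (fun _ => "Others")
      (PySem.Dict.empty : PySem.Dict String String) k "Others"
  have hB := pv_getD_groupfold pvGroups d0 k "Others"
  simp only [hkin, if_true] at hA h0
  rw [hA, hB, hkeys0]
  simp only [hd0, h0]
  have hkS : k ∈ PySem.Set.update ([] : List String) drug_list := by simpa using hk
  rw [if_pos hkS, pv_chain_eq_cascade]
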